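-- pv_equiv track=rewrite | github.com/eberhardred42-hub/nayti-lyudey-mvp | api/llm_client.py | _template_from_missing
-- ===== SOURCE A (Python) =====
-- from typing import Any, Mapping, Sequence, TypedDict, cast
--
-- def _template_from_missing(missing_fields: Sequence[str]) -> tuple[list[str], list[str]]:
--     questions: list[str] = []
--     quick_replies: list[str] = []
--     if any("company.work_format" in f for f in missing_fields):
--         questions.append("Какой формат работы: офис, гибрид или удаленка?")
--         quick_replies.extend(["Офис", "Гибрид", "Удаленка"])
--     if any("company_location" in f for f in missing_fields):
--         questions.append("В каком городе или регионе ищешь?")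
--         quick_replies.append("Москва")
--     if any("employment.employment_type" in f for f in missing_fields):
--         questions.append("Какая занятость: полный день, частичная или проект?")
--         quick_replies.append("Полный день")
--     if any("compensation" in f for f in missing_fields):
--         questions.append("Какой бюджет или вилка по оплате?")
--         quick_replies.append("Есть бюджет")
--     seen: set[str] = set()
--     quick_replies_unique: list[str] = []
--     for qr in quick_replies:
--         if qr not in seen:
--             quick_replies_unique.append(qr)
--             seen.add(qr)
--     return questions, quick_replies_unique[:6]
-- ===== SOURCE B (Python) =====
-- _KEYS = ["company.work_format", "company_location",
--          "employment.employment_type", "compensation"]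
-- _QUESTIONS = [
--     "Какой формат работы: офис, гибрид или удаленка?",
--     "В каком городе или регионе ищешь?",
--     "Какая занятость: полный день, частичная или проект?",
--     "Какой бюджет или вилка по оплате?",
-- ]
-- _REPLIES = [["Офис", "Гибрид", "Удаленка"], ["Москва"],
--             ["Полный день"], ["Есть бюджет"]]
--
-- # Precompute all 16 possible outcomes, one per 4-bit key-mask (all replies are
-- # distinct across rules, so order-preserving dedup is the identity here).
-- _TABLE = []
-- for _mask in range(16):
--     _qs, _rs = [], []
--     for _i in range(4):
--         if (_mask >> _i) & 1:
--             _qs.append(_QUESTIONS[_i])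
--             _rs.extend(_REPLIES[_i])
--     _TABLE.append((_qs, _rs[:6]))
--
--
-- def _template_from_missing(missing_fields):
--     # single pass: fold the fields into a 4-bit mask, stopping once saturated
--     mask = 0
--     for f in missing_fields:
--         for i in range(4):
--             if _KEYS[i] in f:
--                 mask |= 1 << i
--         if mask == 15:
--             break
--     qs, rs = _TABLE[mask]
--     return list(qs), list(rs)
-- ===== Notes on version B (the rewrite author's own statement) =====
-- stated objective: alternative
-- what changed: Replaces A's four any()-scans, list building and seen-set dedup loop by a single fold of the fields into a 4-bit key mask (with early exit once saturated) and a lookup into a precomputed table of all 16 possible (questions, quick_replies) outcomes.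
import Mathlib
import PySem

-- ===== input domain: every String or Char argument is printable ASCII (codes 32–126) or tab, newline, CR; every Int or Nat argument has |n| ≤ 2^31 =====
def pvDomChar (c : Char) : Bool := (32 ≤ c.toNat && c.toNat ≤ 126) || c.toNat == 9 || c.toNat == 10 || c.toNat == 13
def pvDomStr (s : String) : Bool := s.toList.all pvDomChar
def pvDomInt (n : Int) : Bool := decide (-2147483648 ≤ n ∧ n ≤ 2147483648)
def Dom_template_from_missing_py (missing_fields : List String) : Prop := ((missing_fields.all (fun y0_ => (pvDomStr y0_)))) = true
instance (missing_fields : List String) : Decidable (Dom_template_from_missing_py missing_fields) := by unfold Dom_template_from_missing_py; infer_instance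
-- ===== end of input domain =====

-- B replaces A's four any()-scans and dedup loop by a single fold of the fields into a
-- 4-bit mask (with early exit when saturated) and a lookup in a precomputed table of
-- all 16 outcomes; objective: alternative decomposition, no speed claim.

-- ===== PORT A =====
-- Port of A: four any()-substring checks appending questions/replies, then a seen-set dedup loop and [:6].
def template_from_missing_py (missing_fields : List String) : List String × List String :=
  let questions : List String := []
  let quick_replies : List String := []
  let (questions, quick_replies) :=
    if missing_fields.any (fun f => PySem.Str.isIn "company.work_format" f) then
      (questions ++ ["Какой формат работы: офис, гибрид или удаленка?"],
       quick_replies ++ ["Офис", "Гибрид", "Удаленка"])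
    else (questions, quick_replies)
  let (questions, quick_replies) :=
    if missing_fields.any (fun f => PySem.Str.isIn "company_location" f) then
      (questions ++ ["В каком городе или регионе ищешь?"], quick_replies ++ ["Москва"])
    else (questions, quick_replies)
  let (questions, quick_replies) :=
    if missing_fields.any (fun f => PySem.Str.isIn "employment.employment_type" f) then
      (questions ++ ["Какая занятость: полный день, частичная или проект?"],
       quick_replies ++ ["Полный день"])
    else (questions, quick_replies)
  let (questions, quick_replies) :=
    if missing_fields.any (fun f => PySem.Str.isIn "compensation" f) then
      (questions ++ ["Какой бюджет или вилка по оплате?"], quick_replies ++ ["Есть бюджет"])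
    else (questions, quick_replies)
  let acc := quick_replies.foldl
    (fun (acc : List String × PySem.Set String) qr =>
      if PySem.Set.contains acc.2 qr then acc else (acc.1 ++ [qr], PySem.Set.add acc.2 qr))
    ([], PySem.Set.empty)
  (questions, acc.1.take 6)

-- ===== PORT B =====
def pvKeys : List String :=
  ["company.work_format", "company_location", "employment.employment_type", "compensation"]
def pvQuestions : List String :=
  ["Какой формат работы: офис, гибрид или удаленка?",
   "В каком городе или регионе ищешь?",
   "Какая занятость: полный день, частичная или проект?",
   "Какой бюджет или вилка по оплате?"]
def pvReplies : List (List String) :=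
  [["Офис", "Гибрид", "Удаленка"], ["Москва"], ["Полный день"], ["Есть бюджет"]]

-- Source B's module-level table build: for mask in range(16), gather questions/replies of
-- the set bits and truncate replies to 6.  range(4)/range(16) yield 0..3 / 0..15, so
-- List.range with Nat indexing (getD; always in range) is exact here.
def pvTable : List (List String × List String) :=
  (List.range 16).map (fun mask =>
    let acc := (List.range 4).foldl
      (fun (acc : List String × List String) i =>
        if (mask >>> i) &&& 1 == 1 then
          (acc.1 ++ [pvQuestions.getD i ""], acc.2 ++ pvReplies.getD i [])
        else acc)
      ([], [])
    (acc.1, acc.2.take 6))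

-- the per-field inner loop: mask |= 1 << i for each key occurring in f
def pvFieldStep (f : String) (m : Nat) : Nat :=
  (List.range 4).foldl
    (fun m i => if PySem.Str.isIn (pvKeys.getD i "") f then m ||| (1 <<< i) else m) m

-- the outer loop over missing_fields, breaking once mask == 15
def pvMaskLoop : List String → Nat → Nat
  | [], m => m
  | f :: rest, m =>
      let m' := pvFieldStep f m
      if m' == 15 then m' else pvMaskLoop rest m'

-- Port of B: fold fields into the 4-bit mask, look the outcome up in pvTable.
def template_from_missing_py_alt (missing_fields : List String) : List String × List String :=
  let mask := pvMaskLoop missing_fields 0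
  let e := pvTable.getD mask ([], [])   -- mask < 16, so getD's default is never used
  (e.1, e.2)

-- ===== PRECONDITION & SPEC =====
def Spec_template_from_missing_py (missing_fields : List String) (out : List String × List String) : Prop := out = template_from_missing_py_alt missing_fields
instance (missing_fields : List String) (out : List String × List String) : Decidable (Spec_template_from_missing_py missing_fields out) := by unfold Spec_template_from_missing_py; infer_instance

-- ===== CLAIM (what is proved, stated in full; the proofs are below) =====
def Claim_equal_template_from_missing_py : Prop := ∀ (missing_fields : List String), Dom_template_from_missing_py missing_fields → Spec_template_from_missing_py missing_fields (template_from_missing_py missing_fields)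

-- ===== LEMMAS AND PROOFS =====

-- the 4-bit mask encoding four Booleans
def pvVal (a b c d : Bool) : Nat :=
  (cond a 1 0) ||| (cond b 2 0) ||| (cond c 4 0) ||| (cond d 8 0)

theorem pvFieldStep_unfold (f : String) (m : Nat) :
    pvFieldStep f m =
      (let m1 := if PySem.Str.isIn "company.work_format" f then m ||| 1 else m
       let m2 := if PySem.Str.isIn "company_location" f then m1 ||| 2 else m1
       let m3 := if PySem.Str.isIn "employment.employment_type" f then m2 ||| 4 else m2
       if PySem.Str.isIn "compensation" f then m3 ||| 8 else m3) := rfl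

theorem pvFieldStep_val (f : String) (a b c d : Bool) :
    pvFieldStep f (pvVal a b c d) =
      pvVal (a || PySem.Str.isIn "company.work_format" f)
            (b || PySem.Str.isIn "company_location" f)
            (c || PySem.Str.isIn "employment.employment_type" f)
            (d || PySem.Str.isIn "compensation" f) := by
  rw [pvFieldStep_unfold]
  by_cases h1 : PySem.Str.isIn "company.work_format" f = true <;>
  by_cases h2 : PySem.Str.isIn "company_location" f = true <;>
  by_cases h3 : PySem.Str.isIn "employment.employment_type" f = true <;>
  by_cases h4 : PySem.Str.isIn "compensation" f = true <;>
  simp only [Bool.not_eq_true] at h1 h2 h3 h4 <;>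
  simp only [h1, h2, h3, h4, if_true, Bool.or_true, Bool.or_false] <;>
  cases a <;> cases b <;> cases c <;> cases d <;> rfl

theorem pvVal_eq_15 :
    ∀ a b c d : Bool, (pvVal a b c d == 15) = true ↔
      a = true ∧ b = true ∧ c = true ∧ d = true := by decide

theorem pvMaskLoop_val (fs : List String) (a b c d : Bool) :
    pvMaskLoop fs (pvVal a b c d) =
      pvVal (a || fs.any (fun f => PySem.Str.isIn "company.work_format" f))
            (b || fs.any (fun f => PySem.Str.isIn "company_location" f))
            (c || fs.any (fun f => PySem.Str.isIn "employment.employment_type" f))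
            (d || fs.any (fun f => PySem.Str.isIn "compensation" f)) := by
  induction fs generalizing a b c d with
  | nil => simp [pvMaskLoop]
  | cons f fs ih =>
    simp only [pvMaskLoop, pvFieldStep_val, List.any_cons]
    by_cases h : (pvVal (a || PySem.Str.isIn "company.work_format" f)
        (b || PySem.Str.isIn "company_location" f)
        (c || PySem.Str.isIn "employment.employment_type" f)
        (d || PySem.Str.isIn "compensation" f) == 15) = true
    · obtain ⟨ha, hb, hc, hd⟩ := (pvVal_eq_15 _ _ _ _).mp h
      rw [if_pos h, ← Bool.or_assoc, ← Bool.or_assoc, ← Bool.or_assoc, ← Bool.or_assoc,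
        ha, hb, hc, hd]
      rfl
    · rw [if_neg h, ih, Bool.or_assoc, Bool.or_assoc, Bool.or_assoc, Bool.or_assoc]

-- ===== VERDICT (by name: the statement is the Claim_ definition above) =====
theorem template_from_missing_py_spec : Claim_equal_template_from_missing_py := by
  intro fs _
  unfold Spec_template_from_missing_py template_from_missing_py template_from_missing_py_alt
  have hm : pvMaskLoop fs 0 =
      pvVal (fs.any (fun f => PySem.Str.isIn "company.work_format" f))
            (fs.any (fun f => PySem.Str.isIn "company_location" f))
            (fs.any (fun f => PySem.Str.isIn "employment.employment_type" f))
            (fs.any (fun f => PySem.Str.isIn "compensation" f)) := by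
    have := pvMaskLoop_val fs false false false false
    simpa using this
  rw [hm]
  by_cases b1 : fs.any (fun f => PySem.Str.isIn "company.work_format" f) = true <;>
  by_cases b2 : fs.any (fun f => PySem.Str.isIn "company_location" f) = true <;>
  by_cases b3 : fs.any (fun f => PySem.Str.isIn "employment.employment_type" f) = true <;>
  by_cases b4 : fs.any (fun f => PySem.Str.isIn "compensation" f) = true <;>
  simp only [b1, b2, b3, b4, Bool.not_eq_true] at * <;>
  decide
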